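-- pv_equiv track=rewrite | github.com/elliekao/PBC-112-2 | 模組格式化終檔.py | filter_news
-- ===== SOURCE A (Python) =====
-- def filter_news(news_list, keywords):
--     """
--     根據關鍵字篩選新聞。
--
--     參數:
--         news_list (list): 新聞列表
--         keywords (list): 關鍵字列表
--
--     返回:
--         list: 篩選後的新聞列表
--     """
--     filtered_news = []  # 儲存過濾後的新聞標題與連結
--     for news_item in news_list:
--         title = news_item.get('title', '')  # 獲取新聞標題
--         url = "https://udn.com" + news_item.get('titleLink', '')  # 組合新聞的完整URL
--         for keyword in keywords:  # 檢查所有關鍵字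
--             if keyword in title:  # 如果標題中包含關鍵字
--                 # 添加新聞標題與URL到過濾的清單
--                 filtered_news.append({'title': title, 'url': url})
--                 break
--     return filtered_news  # 返回過濾後的新聞清單
-- ===== SOURCE B (Python) =====
-- def filter_news(news_list, keywords):
--     # Prune the keyword set once: a keyword is redundant when some already-kept
--     # keyword is a substring of it (any title containing it also contains the
--     # shorter one), then filter each title with a single any() over the pruned set.
--     needed = []
--     for kw in keywords:
--         if not any(m in kw for m in needed):
--             needed.append(kw)
--     return [
--         {'title': item.get('title', ''),
--          'url': "https://udn.com" + item.get('titleLink', '')}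
--         for item in news_list
--         if any(kw in item.get('title', '') for kw in needed)
--     ]
-- ===== Notes on version B (the rewrite author's own statement) =====
-- stated objective: faster
-- what changed: B first prunes the keyword list to a sufficient subset (dropping every keyword that contains an already-kept keyword as a substring) and then filters the titles in one comprehension with any() over the pruned set, instead of A's per-title append-and-break loop over the full keyword list.
import Mathlib
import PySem

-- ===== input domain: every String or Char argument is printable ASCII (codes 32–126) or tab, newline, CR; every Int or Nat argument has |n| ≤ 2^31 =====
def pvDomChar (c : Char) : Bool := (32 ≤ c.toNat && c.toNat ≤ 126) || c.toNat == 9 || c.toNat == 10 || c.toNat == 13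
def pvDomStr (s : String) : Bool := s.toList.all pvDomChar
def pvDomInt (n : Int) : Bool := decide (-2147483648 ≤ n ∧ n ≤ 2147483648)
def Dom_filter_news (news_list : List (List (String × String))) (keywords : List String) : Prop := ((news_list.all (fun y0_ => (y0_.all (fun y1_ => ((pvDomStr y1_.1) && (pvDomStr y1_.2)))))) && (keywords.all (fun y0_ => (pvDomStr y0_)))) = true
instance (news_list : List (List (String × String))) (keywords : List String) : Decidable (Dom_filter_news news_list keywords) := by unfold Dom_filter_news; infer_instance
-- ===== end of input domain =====

-- B prunes the keyword list once (drops keywords containing an already-kept keyword)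
-- and filters titles with one any() over the pruned set; alternative decomposition, same results.


-- shared input-convention helper: d.get(k, dflt) on an association-list dict (first match)
def pvGetD (d : List (String × String)) (k dflt : String) : String :=
  match d.find? (fun p => p.1 == k) with
  | some p => p.2
  | none => dflt

-- ===== PORT A =====
-- inner 'for keyword in keywords: if keyword in title: …; break' — true iff the loop appends
def aScan (title : String) : List String → Bool
  | [] => false
  | kw :: rest => if PySem.Str.isIn kw title then true else aScan title rest

def filter_news (news_list : List (List (String × String))) (keywords : List String) : List (List (String × String)) :=
  news_list.foldl (fun acc item =>
    let title := pvGetD item "title" ""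
    let url := "https://udn.com" ++ pvGetD item "titleLink" ""
    if aScan title keywords then acc ++ [[("title", title), ("url", url)]] else acc) []

-- ===== PORT B =====
-- prune: keep a keyword only if no already-kept keyword is a substring of it
def bNeeded (keywords : List String) : List String :=
  keywords.foldl (fun needed kw =>
    if needed.any (fun m => PySem.Str.isIn m kw) then needed else needed ++ [kw]) []

def filter_news_alt (news_list : List (List (String × String))) (keywords : List String) : List (List (String × String)) :=
  let needed := bNeeded keywords
  (news_list.filter (fun item => needed.any (fun kw => PySem.Str.isIn kw (pvGetD item "title" "")))).map
    (fun item => [("title", pvGetD item "title" ""), ("url", "https://udn.com" ++ pvGetD item "titleLink" "")])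

-- ===== PRECONDITION & SPEC =====
def Spec_filter_news (news_list : List (List (String × String))) (keywords : List String) (out : List (List (String × String))) : Prop := out = filter_news_alt news_list keywords
instance (news_list : List (List (String × String))) (keywords : List String) (out : List (List (String × String))) : Decidable (Spec_filter_news news_list keywords out) := by unfold Spec_filter_news; infer_instance

-- ===== CLAIM (what is proved, stated in full; the proofs are below) =====
def Claim_equal_filter_news : Prop := ∀ (news_list : List (List (String × String))) (keywords : List String), Dom_filter_news news_list keywords → Spec_filter_news news_list keywords (filter_news news_list keywords)

-- ===== LEMMAS AND PROOFS =====

-- A's inner break-loop is an any over the keywords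
theorem aScan_eq_any (title : String) (ks : List String) :
    aScan title ks = ks.any (fun kw => PySem.Str.isIn kw title) := by
  induction ks with
  | nil => rfl
  | cons kw rest ih =>
      simp only [aScan, List.any_cons]
      cases hb : PySem.Str.isIn kw title <;> simp [ih]

-- substring transitivity on strings, via the infix characterisation
theorem isIn_trans {m kw t : String} (h1 : PySem.Str.isIn m kw = true)
    (h2 : PySem.Str.isIn kw t = true) : PySem.Str.isIn m t = true := by
  rw [PySem.Str.isIn_iff_infix] at *
  exact h1.trans h2

-- folding the pruning step preserves, for every title, whether some keyword matches
theorem bNeeded_fold_any (t : String) (ks : List String) (acc : List String) :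
    ((ks.foldl (fun needed kw =>
        if needed.any (fun m => PySem.Str.isIn m kw) then needed else needed ++ [kw]) acc).any
      (fun kw => PySem.Str.isIn kw t))
    = (acc.any (fun kw => PySem.Str.isIn kw t) || ks.any (fun kw => PySem.Str.isIn kw t)) := by
  induction ks generalizing acc with
  | nil => simp
  | cons kw rest ih =>
      simp only [List.foldl_cons, List.any_cons]
      by_cases h : acc.any (fun m => PySem.Str.isIn m kw) = true
      · rw [if_pos h, ih]
        cases ht : PySem.Str.isIn kw t with
        | true =>
            obtain ⟨m, hm, hmk⟩ := List.any_eq_true.mp h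
            have hacc : acc.any (fun kw => PySem.Str.isIn kw t) = true :=
              List.any_eq_true.mpr ⟨m, hm, isIn_trans hmk ht⟩
            rw [hacc]
            simp only [Bool.true_or]
        | false =>
            simp only [Bool.false_or]
      · rw [if_neg h, ih]
        simp only [List.any_append, List.any_cons, List.any_nil, Bool.or_false, Bool.or_assoc]

theorem bNeeded_any (t : String) (ks : List String) :
    (bNeeded ks).any (fun kw => PySem.Str.isIn kw t) = ks.any (fun kw => PySem.Str.isIn kw t) := by
  have := bNeeded_fold_any t ks []
  simpa [bNeeded] using this

-- ===== VERDICT (by name: the statement is the Claim_ definition above) =====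
theorem filter_news_spec : Claim_equal_filter_news := by
  intro news_list keywords _
  unfold Spec_filter_news filter_news filter_news_alt
  rw [PySem.List.foldl_append_if
    (p := fun item => aScan (pvGetD item "title" "") keywords)
    (f := fun item => [("title", pvGetD item "title" ""),
                       ("url", "https://udn.com" ++ pvGetD item "titleLink" "")])]
  simp only [List.nil_append]
  congr 1
  apply List.filter_congr
  intro item _
  rw [aScan_eq_any, bNeeded_any]
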